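-- pv_equiv track=rewrite | github.com/leesh26/MyAlgorithm | prices.py | solution
-- ===== SOURCE A (Python) =====
-- def solution(prices):
--     answer = []
--
--     for k in range (len(prices)):
--         # lower_day의 초기값 지정 (총 길이 - 현재값 + 1)
--         # 아래 for문에서 하락하지 않으면 초기값이 lower 리스트에 저장되도록 함
--         lower_day=len(prices)-(k+1)
--
--         for i in range (k , len(prices)):
--             # 자신보다 작은값이 나오면 lower_day의 값을 바꿔줌
--             if prices[k]>prices[i]:
--                 lower_day = i-k
--         answer.append(lower_day)
--
--     return answer
-- ===== SOURCE B (Python) =====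
-- def solution(prices):
--     # Right-to-left sweep keeping the strict suffix-minima stack (index/value
--     # both decreasing along the list); binary search finds the rightmost lower
--     # price in O(log n) per day: O(n log n) total vs A's O(n^2).
--     n = len(prices)
--     cands = []  # (index, value); indices and values strictly decreasing
--     out = []
--     for k in range(n - 1, -1, -1):
--         p = prices[k]
--         lo, hi = 0, len(cands)
--         while lo < hi:
--             mid = (lo + hi) // 2
--             if cands[mid][1] < p:
--                 hi = mid
--             else:
--                 lo = mid + 1
--         out.append(cands[lo][0] - k if lo < len(cands) else n - 1 - k)
--         if not cands or p < cands[-1][1]: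
--             cands.append((k, p))
--     return out[::-1]
-- ===== Notes on version B (the rewrite author's own statement) =====
-- stated objective: faster
-- what changed: Replaces A's nested forward scans (for each day, rescan the whole suffix for the last lower price) by a single right-to-left sweep maintaining the strict suffix-minima stack, answering each day with a binary search on that stack.
import Mathlib
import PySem

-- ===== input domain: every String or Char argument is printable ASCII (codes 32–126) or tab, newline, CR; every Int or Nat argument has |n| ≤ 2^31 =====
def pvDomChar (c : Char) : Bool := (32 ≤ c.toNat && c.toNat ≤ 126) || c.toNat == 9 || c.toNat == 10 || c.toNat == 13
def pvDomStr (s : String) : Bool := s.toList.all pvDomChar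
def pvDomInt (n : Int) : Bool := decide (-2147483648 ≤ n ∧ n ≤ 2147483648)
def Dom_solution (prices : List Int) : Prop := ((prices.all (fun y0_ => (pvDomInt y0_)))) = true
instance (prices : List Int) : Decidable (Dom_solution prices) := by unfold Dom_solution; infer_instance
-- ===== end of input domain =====

-- B replaces A's quadratic nested scans by one right-to-left sweep over a strict
-- suffix-minima stack with a binary search per day (same return value, O(n log n)).

-- ===== PORT A =====
-- inner loop: for i in range(k, len(prices)): if prices[k] > prices[i]: lower_day = i - k
def innerA (prices : List Int) (k : Nat) : Int :=
  (List.range' k (prices.length - k)).foldl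
    (fun lower_day i =>
      if prices.getD k 0 > prices.getD i 0 then (i : Int) - (k : Int) else lower_day)
    ((prices.length : Int) - ((k : Int) + 1))

def solution (prices : List Int) : List Int :=
  (List.range prices.length).foldl (fun answer k => answer ++ [innerA prices k]) []

-- ===== PORT B =====
-- the hand-written while-loop binary search of Source B: first position with value < p
def bsearchB (cands : List (Nat × Int)) (p : Int) (lo hi : Nat) : Nat :=
  if h : lo < hi then
    if (cands.getD ((lo + hi) / 2) (0, 0)).2 < p then bsearchB cands p lo ((lo + hi) / 2)
    else bsearchB cands p ((lo + hi) / 2 + 1) hi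
  else lo
termination_by hi - lo
decreasing_by all_goals omega

-- `if not cands or p < cands[-1][1]: cands.append((k, p))`
def insC (prices : List Int) (cands : List (Nat × Int)) (k : Nat) : List (Nat × Int) :=
  if cands = [] ∨ prices.getD k 0 < (cands.getD (cands.length - 1) (0, 0)).2 then
    cands ++ [(k, prices.getD k 0)]
  else cands

-- one iteration of the `for k in range(n-1, -1, -1)` loop; state = (cands, out)
def stepB (prices : List Int) (n : Nat) (st : List (Nat × Int) × List Int) (k : Nat) :
    List (Nat × Int) × List Int :=
  let p := prices.getD k 0
  let lo := bsearchB st.1 p 0 st.1.length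
  let out := st.2 ++
    [if lo < st.1.length then ((st.1.getD lo (0, 0)).1 : Int) - (k : Int)
     else (n : Int) - 1 - (k : Int)]
  (insC prices st.1 k, out)

def solution_alt (prices : List Int) : List Int :=
  let n := prices.length
  ((((List.range n).reverse).foldl (stepB prices n) ([], [])).2).reverse

-- ===== PRECONDITION & SPEC =====
def Spec_solution (prices : List Int) (out : List Int) : Prop := out = solution_alt prices
instance (prices : List Int) (out : List Int) : Decidable (Spec_solution prices out) := by unfold Spec_solution; infer_instance

-- ===== CLAIM (what is proved, stated in full; the proofs are below) =====
def Claim_equal_solution : Prop := ∀ (prices : List Int), Dom_solution prices → Spec_solution prices (solution prices)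

-- ===== LEMMAS AND PROOFS =====

-- the filtered list of "lower" indices A's inner loop ranges over
def lowersF (prices : List Int) (k : Nat) : List Nat :=
  (List.range' k (prices.length - k)).filter
    (fun i => decide (prices.getD k 0 > prices.getD i 0))

-- the common per-day value: distance to the last lower price, else to the end
def gval (prices : List Int) (n k : Nat) : Int :=
  match (lowersF prices k).getLast? with
  | some i => (i : Int) - (k : Int)
  | none => (n : Int) - ((k : Int) + 1)

-- j is a strict suffix minimum (strictly below every later price up to n)
def isMinSuf (prices : List Int) (n j : Nat) : Prop :=
  ∀ j', j < j' → j' < n → prices.getD j 0 < prices.getD j' 0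

-- invariant of B's stack after processing the top m indices n-1, …, n-m
def InvC (prices : List Int) (n m : Nat) (c : List (Nat × Int)) : Prop :=
  c.Pairwise (fun a b => b.1 < a.1) ∧
  (∀ x ∈ c, n - m ≤ x.1 ∧ x.1 < n ∧ x.2 = prices.getD x.1 0 ∧ isMinSuf prices n x.1) ∧
  (∀ j, n - m ≤ j → j < n → isMinSuf prices n j → (j, prices.getD j 0) ∈ c) ∧
  (∀ j, n - m ≤ j → j < n → ∀ x, c.getLast? = some x → x.2 ≤ prices.getD j 0) ∧
  (c = [] → m = 0)

-- B's stack after processing the top m indices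
def stackS (prices : List Int) (n : Nat) : Nat → List (Nat × Int)
  | 0 => []
  | m + 1 => insC prices (stackS prices n m) (n - 1 - m)

lemma foldl_append_singleton (g : Nat → Int) :
    ∀ (l : List Nat) (init : List Int),
      l.foldl (fun a k => a ++ [g k]) init = init ++ l.map g := by
  intro l
  induction l with
  | nil => intro init; simp
  | cons x t ih => intro init; simp [List.foldl_cons, ih]

lemma foldl_if_last (P : Nat → Prop) [DecidablePred P] (f : Nat → Int) :
    ∀ (l : List Nat) (d : Int),
      l.foldl (fun a i => if P i then f i else a) d =
        match (l.filter (fun i => decide (P i))).getLast? with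
        | some i => f i
        | none => d := by
  intro l
  induction l with
  | nil => intro d; simp
  | cons x t ih =>
    intro d
    by_cases hx : P x
    · rcases h : (t.filter (fun i => decide (P i))).getLast? with _ | j
      · have ht : t.filter (fun i => decide (P i)) = [] := List.getLast?_eq_none_iff.mp h
        simp [List.foldl_cons, hx, ih, ht]
      · have hne : t.filter (fun i => decide (P i)) ≠ [] := by
          intro hc; simp [hc] at h
        simp [List.foldl_cons, hx, ih, h, List.getLast?_cons]
    · simp [List.foldl_cons, hx, ih]

lemma pairwise_lt_getLast_max :
    ∀ (l : List Nat) (y : Nat), l.Pairwise (· < ·) → l.getLast? = some y →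
      ∀ x ∈ l, x ≤ y := by
  intro l
  induction l with
  | nil => intro y _ h; cases h
  | cons a t ih =>
    intro y hp hl x hx
    rcases List.pairwise_cons.mp hp with ⟨ha, hpt⟩
    cases t with
    | nil =>
      simp at hl hx; omega
    | cons b t' =>
      rw [List.getLast?_cons_cons] at hl
      rcases List.mem_cons.mp hx with hx | hx
      · subst hx; exact le_of_lt (ha y (List.mem_of_getLast? hl))
      · exact ih y hpt hl x hx

lemma bs_eq (c : List (Nat × Int)) (p : Int) (L : Nat) (_hL : L ≤ c.length)
    (Hlo : ∀ q, q < L → ¬ (c.getD q (0, 0)).2 < p)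
    (Hhi : ∀ q, L ≤ q → q < c.length → (c.getD q (0, 0)).2 < p) :
    ∀ lo hi, lo ≤ L → L ≤ hi → hi ≤ c.length → bsearchB c p lo hi = L := by
  have aux : ∀ d lo hi, hi - lo ≤ d → lo ≤ L → L ≤ hi → hi ≤ c.length →
      bsearchB c p lo hi = L := by
    intro d
    induction d with
    | zero =>
      intro lo hi h1 h2 h3 _
      rw [bsearchB, dif_neg (by omega : ¬ lo < hi)]; omega
    | succ d ih =>
      intro lo hi h1 h2 h3 h4
      rw [bsearchB]
      by_cases hlt : lo < hi
      · rw [dif_pos hlt]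
        have hmlo : lo ≤ (lo + hi) / 2 := by omega
        have hmhi : (lo + hi) / 2 < hi := by omega
        by_cases hp' : (c.getD ((lo + hi) / 2) (0, 0)).2 < p
        · rw [if_pos hp']
          have hLm : L ≤ (lo + hi) / 2 := by
            by_contra hc; push_neg at hc
            exact Hlo _ hc hp'
          exact ih lo ((lo + hi) / 2) (by omega) h2 hLm (by omega)
        · rw [if_neg hp']
          have hLm : (lo + hi) / 2 + 1 ≤ L := by
            by_contra hc; push_neg at hc
            exact hp' (Hhi _ (by omega) (by omega))
          exact ih ((lo + hi) / 2 + 1) hi (by omega) hLm h3 h4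
      · rw [dif_neg hlt]; omega
  intro lo hi h2 h3 h4
  exact aux (hi - lo) lo hi le_rfl h2 h3 h4

lemma invS_step (prices : List Int) (n m : Nat) (c : List (Nat × Int))
    (hm : m < n) (hinv : InvC prices n m c) :
    InvC prices n (m + 1) (insC prices c (n - 1 - m)) := by
  obtain ⟨h1, h2, h3, h4, h5⟩ := hinv
  have hkn : n - 1 - m < n := by omega
  have hwin : n - (m + 1) = n - 1 - m := by omega
  unfold insC
  by_cases hce : c = []
  · subst hce
    have hm0 : m = 0 := h5 rfl
    subst hm0
    rw [if_pos (Or.inl rfl)]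
    refine ⟨by simp, ?_, ?_, ?_, by simp⟩
    · intro x hx
      simp at hx; subst hx
      refine ⟨by omega, by omega, rfl, ?_⟩
      intro j' hj1 hj2; omega
    · intro j hj1 hj2 _
      have : j = n - 1 - 0 := by omega
      subst this; simp
    · intro j hj1 hj2 x hx
      simp at hx
      have : j = n - 1 - 0 := by omega
      subst this; rw [← hx]; simp [List.getD]
  · have hlen : 0 < c.length := List.length_pos_iff.mpr hce
    have hgl : c.getLast? = some (c.getD (c.length - 1) (0, 0)) := by
      rw [List.getLast?_eq_getElem?, List.getD_eq_getElem c (0, 0) (by omega),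
        List.getElem?_eq_getElem (by omega)]
    have hx0mem : c.getD (c.length - 1) (0, 0) ∈ c := by
      rw [List.getD_eq_getElem c (0, 0) (by omega)]
      exact List.getElem_mem _
    obtain ⟨hx0w, hx0n, hx0v, hx0min⟩ := h2 _ hx0mem
    by_cases hplt : prices.getD (n - 1 - m) 0 < (c.getD (c.length - 1) (0, 0)).2
    · -- appended: n-1-m is a new strict suffix minimum
      rw [if_pos (Or.inr hplt)]
      have hmin : isMinSuf prices n (n - 1 - m) := by
        intro j' hj1 hj2
        have := h4 j' (by omega) hj2 _ hgl
        omega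
      refine ⟨?_, ?_, ?_, ?_, by simp⟩
      · rw [List.pairwise_append]
        refine ⟨h1, by simp, ?_⟩
        intro a ha b hb
        simp at hb; subst hb
        have := (h2 a ha).1; simpa using by omega
      · intro x hx
        rcases List.mem_append.mp hx with hx | hx
        · obtain ⟨w1, w2, w3, w4⟩ := h2 x hx
          exact ⟨by omega, w2, w3, w4⟩
        · simp at hx; subst hx
          exact ⟨by omega, by omega, rfl, hmin⟩
      · intro j hj1 hj2 hjmin
        rcases Nat.eq_or_lt_of_le hj1 with hj | hj
        · rw [hwin] at hj; subst hj; simp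
        · exact List.mem_append.mpr (Or.inl (h3 j (by omega) hj2 hjmin))
      · intro j hj1 hj2 x hx
        rw [List.getLast?_concat] at hx
        cases hx
        rcases Nat.eq_or_lt_of_le hj1 with hj | hj
        · rw [hwin] at hj; subst hj; simp [List.getD]
        · have := hmin j (by omega) hj2
          omega
    · -- not appended
      rw [if_neg (by push_neg; exact ⟨hce, by omega⟩)]
      have hnotmin : ¬ isMinSuf prices n (n - 1 - m) := by
        intro hmin
        have := hmin (c.getD (c.length - 1) (0, 0)).1 (by omega) hx0n
        rw [hx0v] at hplt
        omega
      refine ⟨h1, ?_, ?_, ?_, fun h => absurd h hce⟩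
      · intro x hx
        obtain ⟨w1, w2, w3, w4⟩ := h2 x hx
        exact ⟨by omega, w2, w3, w4⟩
      · intro j hj1 hj2 hjmin
        rcases Nat.eq_or_lt_of_le hj1 with hj | hj
        · rw [hwin] at hj; subst hj; exact absurd hjmin hnotmin
        · exact h3 j (by omega) hj2 hjmin
      · intro j hj1 hj2 x hx
        rw [hgl] at hx; cases hx
        rcases Nat.eq_or_lt_of_le hj1 with hj | hj
        · rw [hwin] at hj; subst hj; omega
        · exact h4 j (by omega) hj2 _ hgl

lemma query_eq (prices : List Int) (n m : Nat) (c : List (Nat × Int))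
    (hn : n = prices.length) (hm : m < n) (hinv : InvC prices n m c) :
    (if bsearchB c (prices.getD (n - 1 - m) 0) 0 c.length < c.length then
        ((c.getD (bsearchB c (prices.getD (n - 1 - m) 0) 0 c.length) (0, 0)).1 : Int) - ((n - 1 - m : Nat) : Int)
      else (n : Int) - 1 - ((n - 1 - m : Nat) : Int)) = gval prices n (n - 1 - m) := by
  obtain ⟨h1, h2, h3, h4, h5⟩ := hinv
  have hwin : n - m = n - 1 - m + 1 := by omega
  have hmemq : ∀ q, q < c.length → c.getD q (0, 0) ∈ c := by
    intro q hq
    rw [List.getD_eq_getElem c (0, 0) hq]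
    exact List.getElem_mem _
  have hpw : ∀ q q', q < q' → q' < c.length →
      (c.getD q' (0, 0)).1 < (c.getD q (0, 0)).1 := by
    intro q q' hqq hq'
    rw [List.getD_eq_getElem c (0, 0) hq', List.getD_eq_getElem c (0, 0) (by omega : q < c.length)]
    exact List.pairwise_iff_getElem.mp h1 q q' (by omega) hq' hqq
  unfold gval
  rcases hF : (lowersF prices (n - 1 - m)).getLast? with _ | j
  · -- no lower price exists
    have hFnil : lowersF prices (n - 1 - m) = [] := List.getLast?_eq_none_iff.mp hF
    have hnone : ∀ i, n - 1 - m ≤ i → i < n → ¬ prices.getD (n - 1 - m) 0 > prices.getD i 0 := by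
      intro i hi1 hi2 hgt
      have hmem : i ∈ (List.range' (n - 1 - m) (prices.length - (n - 1 - m))).filter
          (fun i => decide (prices.getD (n - 1 - m) 0 > prices.getD i 0)) := by
        rw [List.mem_filter]
        refine ⟨List.mem_range'_1.mpr ⟨hi1, by omega⟩, by simpa using hgt⟩
      rw [← lowersF] at hmem
      simp [hFnil] at hmem
    have hbs : bsearchB c (prices.getD (n - 1 - m) 0) 0 c.length = c.length := by
      apply bs_eq c _ c.length le_rfl _ _ 0 c.length (by omega) le_rfl le_rfl
      · intro q hq
        obtain ⟨w1, w2, w3, _⟩ := h2 _ (hmemq q hq)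
        rw [w3]
        exact fun hlt => hnone _ (by omega) w2 hlt
      · intro q hq1 hq2; omega
    rw [hbs, if_neg (by omega)]
    push_cast; ring
  · -- j is the rightmost lower price
    have hjmem := List.mem_of_getLast? hF
    have hjF := hjmem
    rw [lowersF, List.mem_filter] at hjF
    obtain ⟨hjr, hjlt⟩ := hjF
    have hjlt' : prices.getD j 0 < prices.getD (n - 1 - m) 0 := by simpa using hjlt
    obtain ⟨hjlo, hjhi⟩ := List.mem_range'_1.mp hjr
    have hjhi' : j < n := by omega
    have hjne : n - 1 - m < j := by
      rcases Nat.eq_or_lt_of_le hjlo with h | h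
      · subst h; omega
      · exact h
    have hpwF : (lowersF prices (n - 1 - m)).Pairwise (· < ·) := by
      exact (List.pairwise_lt_range' 1 Nat.one_pos).sublist List.filter_sublist
    have hmax : ∀ i ∈ lowersF prices (n - 1 - m), i ≤ j :=
      fun i hi => pairwise_lt_getLast_max _ j hpwF hF i hi
    have hmaxP : ∀ i, n - 1 - m ≤ i → i < n → prices.getD i 0 < prices.getD (n - 1 - m) 0 → i ≤ j := by
      intro i hi1 hi2 hlt
      apply hmax
      rw [lowersF, List.mem_filter]
      exact ⟨List.mem_range'_1.mpr ⟨hi1, by omega⟩, by simpa using hlt⟩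
    have hjmin : isMinSuf prices n j := by
      intro j' hj1 hj2
      by_contra hc; push_neg at hc
      have : j' ≤ j := hmaxP j' (by omega) hj2 (by omega)
      omega
    have hjc : (j, prices.getD j 0) ∈ c := h3 j (by omega) hjhi' hjmin
    obtain ⟨q, hq, hcq0⟩ := List.mem_iff_getElem.mp hjc
    have hcq : c.getD q (0, 0) = (j, prices.getD j 0) := by
      rw [List.getD_eq_getElem c (0, 0) hq]; exact hcq0
    have hbs : bsearchB c (prices.getD (n - 1 - m) 0) 0 c.length = q := by
      apply bs_eq c _ q (by omega) _ _ 0 c.length (by omega) (by omega) le_rfl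
      · intro q' hq'
        intro hlt
        obtain ⟨w1, w2, w3, _⟩ := h2 _ (hmemq q' (by omega))
        have hidx : j < (c.getD q' (0, 0)).1 := by
          have := hpw q' q hq' hq
          rw [hcq] at this
          exact this
        rw [w3] at hlt
        have := hmaxP (c.getD q' (0, 0)).1 (by omega) w2 hlt
        omega
      · intro q'' hq1 hq2
        rcases Nat.eq_or_lt_of_le hq1 with h | h
        · subst h; rw [hcq]; exact hjlt'
        · obtain ⟨w1, w2, w3, w4⟩ := h2 _ (hmemq q'' hq2)
          have hidx : (c.getD q'' (0, 0)).1 < j := by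
            have := hpw q q'' h hq2
            rw [hcq] at this
            exact this
          calc (c.getD q'' (0, 0)).2 = prices.getD (c.getD q'' (0, 0)).1 0 := w3
            _ < prices.getD j 0 := w4 j hidx hjhi'
            _ < prices.getD (n - 1 - m) 0 := hjlt'
    rw [hbs, if_pos (by omega), hcq]

lemma invS (prices : List Int) (n : Nat) (hn : n = prices.length) :
    ∀ m, m ≤ n → InvC prices n m (stackS prices n m) := by
  intro m
  induction m with
  | zero =>
    intro _
    refine ⟨by simp [stackS], by simp [stackS], ?_, by simp [stackS], by simp⟩
    intro j hj₁ hj₂ _; omega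
  | succ m ih =>
    intro h
    exact invS_step prices n m _ (by omega) (ih (by omega))

lemma foldB (prices : List Int) (n : Nat) (hn : n = prices.length) :
    ∀ j, j ≤ n → ∀ out0,
      ((List.range j).reverse).foldl (stepB prices n) (stackS prices n (n - j), out0) =
        (stackS prices n n, out0 ++ ((List.range j).reverse).map (gval prices n)) := by
  intro j
  induction j with
  | zero => intro _ out0; simp
  | succ j ih =>
    intro hj out0
    have hrev : (List.range (j + 1)).reverse = j :: (List.range j).reverse := by
      rw [List.range_succ]; simp
    have hm : n - 1 - (n - (j + 1)) = j := by omega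
    have hstep : stepB prices n (stackS prices n (n - (j + 1)), out0) j =
        (stackS prices n (n - j), out0 ++ [gval prices n j]) := by
      have hq := query_eq prices n (n - (j + 1)) (stackS prices n (n - (j + 1))) hn
        (by omega) (invS prices n hn (n - (j + 1)) (by omega))
      rw [hm] at hq
      have hins : insC prices (stackS prices n (n - (j + 1))) j = stackS prices n (n - j) := by
        have : n - j = (n - (j + 1)) + 1 := by omega
        rw [this, stackS, hm]
      unfold stepB
      simp only []
      rw [hins, hq]
    rw [hrev, List.foldl_cons, hstep, ih (by omega)]
    simp

lemma innerA_eq_gval (prices : List Int) (k : Nat) :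
    innerA prices k = gval prices prices.length k := by
  unfold innerA gval lowersF
  exact foldl_if_last (fun i => prices.getD k 0 > prices.getD i 0) _ _ _

theorem solution_eq_alt (prices : List Int) : solution prices = solution_alt prices := by
  unfold solution solution_alt
  rw [foldl_append_singleton]
  show [] ++ (List.range prices.length).map (innerA prices) =
    (((List.range prices.length).reverse).foldl (stepB prices prices.length) ([], [])).2.reverse
  have h0 : stackS prices prices.length (prices.length - prices.length) = [] := by
    rw [Nat.sub_self]; rfl
  have hB := foldB prices prices.length rfl prices.length le_rfl []
  rw [h0] at hB
  rw [hB]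
  simp only [List.nil_append, List.map_reverse, List.reverse_reverse]
  exact List.map_congr_left (fun k _ => innerA_eq_gval prices k)

-- ===== VERDICT (by name: the statement is the Claim_ definition above) =====
theorem solution_spec : Claim_equal_solution := by
  intro prices _
  unfold Spec_solution
  exact solution_eq_alt prices
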